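-- pv_equiv track=rewrite | github.com/lequycong204/second_language_python | new/Bài giữa kỳ 1 _Spring 2024/Base.py | find_minimum_sum
-- ===== SOURCE A (Python) =====
-- def find_minimum_sum(nums):
--     """
--     Tìm đỉnh núi có tổng nhỏ nhất.
--     Cho một danh sách số nguyên dương nums
--     Bộ 3 chỉ số i, j, k được gọi là đỉnh núi nếu thỏa mãn:
--     i < j < k và nums[i] < nums[j] và nums[j] > nums[k]
--     Ví dụ 1: input [8,6,1,5,3]
--     với i = 2, j = 3 k = 4 tương ứng tạo thành một đỉnh núi với tổng bằng 9 (1 + 5 + 3)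
--     output: 9
--     Ví dụ 2: input [5,4,8,7,10,2]
--     i = 0, j = 2, k = 5 tạo thành một đỉnh núi với tổng bằng 15.
--     i = 1, j = 4, k = 5 tạo thành một đỉnh núi với tổng bằng 16.
--     output : 13
--     Nếu không tồn tại đỉnh núi nào trong danh sách
--     output : -1
--     """
--     n = len(nums)
--     if n < 3:
--         return -1
--
--     # Compute min_left: minimum value to the left of each index
--     min_left = [0] * n
--     current_min = nums[0]
--     for j in range(1, n):
--         min_left[j] = current_min
--         if nums[j] < current_min:
--             current_min = nums[j]
--
--     # Compute min_right: minimum value to the right of each index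
--     min_right = [0] * n
--     current_min = nums[n-1]
--     for j in range(n-2, -1, -1):
--         min_right[j] = current_min
--         if j > 0 and nums[j] < current_min:
--             current_min = nums[j]
--
--     # Find all valid mountain sums
--     sums = []
--     for j in range(1, n-1):
--         if min_left[j] < nums[j] and min_right[j] < nums[j]:
--             sums.append(min_left[j] + nums[j] + min_right[j])
--
--     # Return the minimum sum or -1 if no mountains exist
--     return min(sums) if sums else -1
-- ===== SOURCE B (Python) =====
-- def find_minimum_sum(nums):
--     n = len(nums)
--     if n < 3:
--         return -1
--     best = None
--     for j in range(1, n - 1):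
--         leftmin = min(nums[:j])
--         rightmin = min(nums[j+1:])
--         if leftmin < nums[j] and rightmin < nums[j]:
--             s = leftmin + nums[j] + rightmin
--             if best is None or s < best:
--                 best = s
--     return best if best is not None else -1
-- ===== Notes on version B (the rewrite author's own statement) =====
-- stated objective: simpler
-- what changed: Replaced the two precomputed prefix/suffix minimum index tables and the collected sums list by a single loop over the peak index that rescans left and right with min() and keeps a running best (None sentinel).
import Mathlib
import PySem

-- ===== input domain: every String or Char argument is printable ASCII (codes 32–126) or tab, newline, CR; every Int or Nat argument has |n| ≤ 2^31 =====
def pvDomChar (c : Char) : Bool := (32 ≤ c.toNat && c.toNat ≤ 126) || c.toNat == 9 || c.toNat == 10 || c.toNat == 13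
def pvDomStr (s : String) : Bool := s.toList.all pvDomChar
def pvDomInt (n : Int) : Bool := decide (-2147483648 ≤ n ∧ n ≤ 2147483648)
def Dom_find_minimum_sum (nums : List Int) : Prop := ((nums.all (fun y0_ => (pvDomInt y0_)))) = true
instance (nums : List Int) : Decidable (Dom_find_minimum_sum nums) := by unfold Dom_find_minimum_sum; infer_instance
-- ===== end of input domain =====

-- B replaces A's two precomputed prefix/suffix minimum tables and collected sums list by a
-- single loop over the peak index that rescans left and right and keeps a running best (simpler).

-- ===== PORT A =====
def find_minimum_sum (nums : List Int) : Int :=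
  let n : Int := PySem.List.len nums
  if n < 3 then -1
  else
    -- min_left table built by the forward loop over range(1, n)
    let stL := (PySem.List.pyRange 1 n 1).foldl
      (fun (st : List Int × Int) j =>
        (st.1.set j.toNat st.2,
         if PySem.List.pyGetD nums j 0 < st.2 then PySem.List.pyGetD nums j 0 else st.2))
      (List.replicate n.toNat 0, PySem.List.pyGetD nums 0 0)
    -- min_right table built by the backward loop over range(n-2, -1, -1)
    let stR := (PySem.List.pyRange (n - 2) (-1) (-1)).foldl
      (fun (st : List Int × Int) j =>
        (st.1.set j.toNat st.2,
         if 0 < j ∧ PySem.List.pyGetD nums j 0 < st.2 then PySem.List.pyGetD nums j 0 else st.2))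
      (List.replicate n.toNat 0, PySem.List.pyGetD nums (n - 1) 0)
    -- collect all valid mountain sums
    let sums := (PySem.List.pyRange 1 (n - 1) 1).foldl
      (fun (acc : List Int) j =>
        if PySem.List.pyGetD stL.1 j 0 < PySem.List.pyGetD nums j 0 ∧
           PySem.List.pyGetD stR.1 j 0 < PySem.List.pyGetD nums j 0 then
          acc ++ [PySem.List.pyGetD stL.1 j 0 + PySem.List.pyGetD nums j 0 +
                  PySem.List.pyGetD stR.1 j 0]
        else acc) []
    -- min(sums) if sums else -1
    match PySem.List.min? sums (fun y => y) with
    | none => -1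
    | some m => m

-- ===== PORT B =====
def find_minimum_sum_alt (nums : List Int) : Int :=
  let n : Int := PySem.List.len nums
  if n < 3 then -1
  else
    let best := (PySem.List.pyRange 1 (n - 1) 1).foldl
      (fun (best : Option Int) j =>
        let leftmin := (PySem.List.min? (PySem.List.slice nums none (some j)) (fun y => y)).getD 0
        let rightmin := (PySem.List.min? (PySem.List.slice nums (some (j + 1)) none) (fun y => y)).getD 0
        if leftmin < PySem.List.pyGetD nums j 0 ∧ rightmin < PySem.List.pyGetD nums j 0 then
          let s := leftmin + PySem.List.pyGetD nums j 0 + rightmin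
          match best with
          | none => some s
          | some b => if s < b then some s else some b
        else best) none
    match best with
    | none => -1
    | some b => b

-- ===== PRECONDITION & SPEC =====
def Spec_find_minimum_sum (nums : List Int) (out : Int) : Prop := out = find_minimum_sum_alt nums
instance (nums : List Int) (out : Int) : Decidable (Spec_find_minimum_sum nums out) := by unfold Spec_find_minimum_sum; infer_instance

-- ===== CLAIM (what is proved, stated in full; the proofs are below) =====
def Claim_equal_find_minimum_sum : Prop := ∀ (nums : List Int), Dom_find_minimum_sum nums → Spec_find_minimum_sum nums (find_minimum_sum nums)

-- ===== LEMMAS AND PROOFS =====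

def pvLm (nums : List Int) (k : Nat) : Int :=
  (PySem.List.min? (nums.take k) (fun y => y)).getD 0
def pvRm (nums : List Int) (k : Nat) : Int :=
  (PySem.List.min? (nums.drop k) (fun y => y)).getD 0


lemma pvFoldlMin (t : List Int) (x : Int) :
    List.foldl min x t =
      match PySem.List.min? t (fun y => y) with
      | none => x
      | some m => min x m := by
  induction t generalizing x with
  | nil => simp [(PySem.List.min?_eq_none_iff ([]:List Int) (fun y => y)).mpr rfl]
  | cons y t ih =>
    rw [PySem.List.min?_id_cons]
    simp only [List.foldl_cons]
    rw [ih (min x y), ih y]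
    cases h : PySem.List.min? t (fun y => y) with
    | none => simp
    | some m => simp [min_assoc]

lemma pvMinAppendSingleton (xs : List Int) (v : Int) :
    PySem.List.min? (xs ++ [v]) (fun y => y) =
      some (match PySem.List.min? xs (fun y => y) with
            | none => v
            | some m => min m v) := by
  cases xs with
  | nil => simp [PySem.List.min?_id_cons, (PySem.List.min?_eq_none_iff ([]:List Int) (fun y => y)).mpr rfl]
  | cons x t =>
    rw [List.cons_append, PySem.List.min?_id_cons, PySem.List.min?_id_cons]
    simp [List.foldl_append]

lemma pvGet_eq (nums : List Int) (k : Nat) (h : k < nums.length) :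
    PySem.List.pyGetD nums (k : Int) 0 = nums[k] := by
  rw [PySem.List.pyGetD_eq_getElem nums (i := (k : Int)) 0 (by omega) (by exact_mod_cast h)]
  simp

lemma pvLm_one (nums : List Int) (h : 0 < nums.length) :
    pvLm nums 1 = PySem.List.pyGetD nums 0 0 := by
  cases nums with
  | nil => simp at h
  | cons x t => simp [pvLm, PySem.List.min?_id_cons, PySem.List.pyGetD]

lemma pvLm_succ (nums : List Int) (k : Nat) (h1 : 1 ≤ k) (h2 : k < nums.length) :
    pvLm nums (k + 1) = min (PySem.List.pyGetD nums (k : Int) 0) (pvLm nums k) := by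
  have htake : nums.take (k+1) = nums.take k ++ [nums[k]] := by
    rw [List.take_add_one]
    simp [List.getElem?_eq_getElem h2]
  have hne : nums.take k ≠ [] := by
    intro hnil
    have hlen : (nums.take k).length = 0 := by rw [hnil]; rfl
    rw [List.length_take] at hlen
    omega
  rw [pvLm, htake, pvMinAppendSingleton]
  cases h : PySem.List.min? (nums.take k) (fun y => y) with
  | none => exact absurd ((PySem.List.min?_eq_none_iff _ _).mp h) hne
  | some m => simp [pvLm, h, pvGet_eq nums k h2, min_comm]

lemma pvRm_last (nums : List Int) (h : 0 < nums.length) :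
    pvRm nums (nums.length - 1) = PySem.List.pyGetD nums ((nums.length : Int) - 1) 0 := by
  have hd : nums.drop (nums.length - 1) = nums[nums.length - 1]'(by omega) :: nums.drop nums.length := by
    rw [List.drop_eq_getElem_cons (by omega)]
    have h1 : nums.length - 1 + 1 = nums.length := by omega
    rw [h1]
  have hidx : ((nums.length : Int) - 1) = ((nums.length - 1 : Nat) : Int) := by omega
  rw [pvRm, hd, hidx, pvGet_eq nums (nums.length - 1) (by omega)]
  simp [PySem.List.min?_id_cons]

lemma pvRm_cons (nums : List Int) (k : Nat) (h : k + 1 < nums.length) :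
    pvRm nums k = min (PySem.List.pyGetD nums (k : Int) 0) (pvRm nums (k + 1)) := by
  have hd : nums.drop k = nums[k]'(by omega) :: nums.drop (k+1) := by
    rw [List.drop_eq_getElem_cons (by omega)]
  have hne : nums.drop (k+1) ≠ [] := by simp; omega
  rw [pvRm, hd, PySem.List.min?_id_cons]
  rw [pvFoldlMin]
  cases hm : PySem.List.min? (nums.drop (k+1)) (fun y => y) with
  | none => exact absurd ((PySem.List.min?_eq_none_iff _ _).mp hm) hne
  | some m => simp [pvRm, hm, pvGet_eq nums k (by omega)]

lemma pvGetD_set (xs : List Int) (k : Nat) (v : Int) (j : Int)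
    (h0 : 0 ≤ j) (h1 : j < xs.length) :
    PySem.List.pyGetD (xs.set k v) j 0 =
      if j = (k : Int) ∧ k < xs.length then v else PySem.List.pyGetD xs j 0 := by
  rw [PySem.List.pyGetD_eq_getElem _ 0 h0 (by simpa using h1),
      PySem.List.pyGetD_eq_getElem _ 0 h0 h1]
  by_cases hk : j.toNat = k ∧ k < xs.length
  · rw [if_pos ⟨by omega, hk.2⟩]
    have : k = j.toNat := hk.1.symm
    subst this
    exact List.getElem_set_self _
  · rw [if_neg (by omega)]
    rcases eq_or_ne j.toNat k with he | hne
    · have : xs.length ≤ k := by omega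
      simp [List.set_eq_of_length_le this]
    · exact List.getElem_set_ne (Ne.symm hne) _

lemma pvFwdInv (nums : List Int) (k : Nat) :
    ∀ (a : Int) (ml : List Int) (cm : Int),
      1 ≤ a → a + k = nums.length → ml.length = nums.length →
      cm = pvLm nums a.toNat →
      (((PySem.List.pyRange a (nums.length : Int) 1).foldl
          (fun (st : List Int × Int) j =>
            (st.1.set j.toNat st.2,
             if PySem.List.pyGetD nums j 0 < st.2 then PySem.List.pyGetD nums j 0 else st.2))
          (ml, cm)).1.length = nums.length ∧
       ∀ (j : Int), 0 ≤ j → j < (nums.length : Int) →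
         PySem.List.pyGetD ((PySem.List.pyRange a (nums.length : Int) 1).foldl
            (fun (st : List Int × Int) j =>
              (st.1.set j.toNat st.2,
               if PySem.List.pyGetD nums j 0 < st.2 then PySem.List.pyGetD nums j 0 else st.2))
            (ml, cm)).1 j 0 =
           if j < a then PySem.List.pyGetD ml j 0 else pvLm nums j.toNat) := by
  induction k with
  | zero =>
    intro a ml cm ha han hlen hcm
    rw [PySem.List.pyRange_one_eq_nil (by omega)]
    simp only [List.foldl_nil]
    exact ⟨hlen, fun j h0 h1 => by rw [if_pos (by omega)]⟩
  | succ k ih =>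
    intro a ml cm ha han hlen hcm
    rw [PySem.List.pyRange_one_cons (by omega), List.foldl_cons]
    have hcm1 : (if PySem.List.pyGetD nums a 0 < cm then PySem.List.pyGetD nums a 0 else cm)
        = pvLm nums (a + 1).toNat := by
      have h1 : (a + 1).toNat = a.toNat + 1 := by omega
      have h2 : ((a.toNat : Int)) = a := by omega
      rw [h1, pvLm_succ nums a.toNat (by omega) (by omega), h2, hcm]
      rcases lt_or_ge (PySem.List.pyGetD nums a 0) (pvLm nums a.toNat) with h | h
      · rw [if_pos h, min_eq_left (le_of_lt h)]
      · rw [if_neg (not_lt.mpr h), min_eq_right h]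
    have hr := ih (a + 1) (ml.set a.toNat cm)
      (if PySem.List.pyGetD nums a 0 < cm then PySem.List.pyGetD nums a 0 else cm)
      (by omega) (by omega) (by simpa using hlen) hcm1
    refine ⟨hr.1, fun j h0 h1 => ?_⟩
    rw [hr.2 j h0 h1]
    rcases lt_trichotomy j a with hja | hja | hja
    · rw [if_pos (by omega), if_pos hja,
        pvGetD_set ml a.toNat cm j h0 (by omega)]
      rw [if_neg (by rintro ⟨h1, h2⟩; omega)]
    · subst hja
      rw [if_pos (by omega), if_neg (by omega),
        pvGetD_set ml j.toNat cm j h0 (by omega)]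
      rw [if_pos ⟨by omega, by omega⟩, hcm]
    · rw [if_neg (by omega), if_neg (by omega)]

lemma pvBwdInv (nums : List Int) (k : Nat) :
    ∀ (a : Int) (mr : List Int) (cm : Int),
      a = (k : Int) - 1 → a ≤ (nums.length : Int) - 2 → mr.length = nums.length →
      (0 ≤ a → cm = pvRm nums (a.toNat + 1)) →
      (((PySem.List.pyRange a (-1) (-1)).foldl
          (fun (st : List Int × Int) j =>
            (st.1.set j.toNat st.2,
             if 0 < j ∧ PySem.List.pyGetD nums j 0 < st.2 then PySem.List.pyGetD nums j 0 else st.2))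
          (mr, cm)).1.length = nums.length ∧
       ∀ (j : Int), 0 ≤ j → j < (nums.length : Int) →
         PySem.List.pyGetD ((PySem.List.pyRange a (-1) (-1)).foldl
            (fun (st : List Int × Int) j =>
              (st.1.set j.toNat st.2,
               if 0 < j ∧ PySem.List.pyGetD nums j 0 < st.2 then PySem.List.pyGetD nums j 0 else st.2))
            (mr, cm)).1 j 0 =
           if j ≤ a then pvRm nums (j.toNat + 1) else PySem.List.pyGetD mr j 0) := by
  induction k with
  | zero =>
    intro a mr cm ha _ hlen _
    rw [PySem.List.pyRange_neg_one_eq_nil (by omega)]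
    simp only [List.foldl_nil]
    exact ⟨hlen, fun j h0 h1 => by rw [if_neg (by omega)]⟩
  | succ k ih =>
    intro a mr cm ha han hlen hcm
    have ha0 : 0 ≤ a := by omega
    have hcm' := hcm ha0
    rw [PySem.List.pyRange_neg_one_cons (by omega), List.foldl_cons]
    have hcm1 : (0 ≤ a - 1 →
        (if 0 < a ∧ PySem.List.pyGetD nums a 0 < cm then PySem.List.pyGetD nums a 0 else cm)
          = pvRm nums ((a - 1).toNat + 1)) := by
      intro h1a
      have h1 : (a - 1).toNat + 1 = a.toNat := by omega
      have h2 : ((a.toNat : Int)) = a := by omega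
      rw [h1, pvRm_cons nums a.toNat (by omega), h2, hcm']
      have h3 : a.toNat + 1 = (a + 1).toNat := by omega
      rcases lt_or_ge (PySem.List.pyGetD nums a 0) (pvRm nums (a.toNat + 1)) with h | h
      · rw [if_pos ⟨by omega, h⟩, min_eq_left (le_of_lt h)]
      · rw [if_neg (by rintro ⟨_, hlt⟩; omega), min_eq_right h]
    have hr := ih (a - 1) (mr.set a.toNat cm)
      (if 0 < a ∧ PySem.List.pyGetD nums a 0 < cm then PySem.List.pyGetD nums a 0 else cm)
      (by omega) (by omega) (by simpa using hlen) hcm1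
    refine ⟨hr.1, fun j h0 h1 => ?_⟩
    rw [hr.2 j h0 h1]
    rcases lt_trichotomy j a with hja | hja | hja
    · rw [if_pos (by omega), if_pos (by omega)]
    · subst hja
      rw [if_neg (by omega), if_pos (by omega),
        pvGetD_set mr j.toNat cm j h0 (by omega)]
      rw [if_pos ⟨by omega, by omega⟩, hcm']
    · rw [if_neg (by omega), if_neg (by omega),
        pvGetD_set mr a.toNat cm j h0 (by omega)]
      rw [if_neg (by rintro ⟨hh1, hh2⟩; omega)]

def pvCandStep (nums : List Int) (acc : List Int) (j : Int) : List Int :=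
  if pvLm nums j.toNat < PySem.List.pyGetD nums j 0 ∧
     pvRm nums (j.toNat + 1) < PySem.List.pyGetD nums j 0 then
    acc ++ [pvLm nums j.toNat + PySem.List.pyGetD nums j 0 + pvRm nums (j.toNat + 1)]
  else acc

def pvOptStep (nums : List Int) (b : Option Int) (j : Int) : Option Int :=
  if pvLm nums j.toNat < PySem.List.pyGetD nums j 0 ∧
     pvRm nums (j.toNat + 1) < PySem.List.pyGetD nums j 0 then
    match b with
    | none => some (pvLm nums j.toNat + PySem.List.pyGetD nums j 0 + pvRm nums (j.toNat + 1))
    | some b0 =>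
        if pvLm nums j.toNat + PySem.List.pyGetD nums j 0 + pvRm nums (j.toNat + 1) < b0 then
          some (pvLm nums j.toNat + PySem.List.pyGetD nums j 0 + pvRm nums (j.toNat + 1))
        else some b0
  else b

lemma pvRelate (nums : List Int) (js : List Int) :
    ∀ (acc : List Int) (b : Option Int),
      b = PySem.List.min? acc (fun y => y) →
      js.foldl (pvOptStep nums) b =
        PySem.List.min? (js.foldl (pvCandStep nums) acc) (fun y => y) := by
  induction js with
  | nil => intro acc b hb; simpa using hb
  | cons j t ih =>
    intro acc b hb
    simp only [List.foldl_cons]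
    apply ih
    unfold pvOptStep pvCandStep
    split_ifs with hc
    · rw [pvMinAppendSingleton, hb]
      cases hmm : PySem.List.min? acc (fun y => y) with
      | none => rfl
      | some m =>
        rcases lt_or_ge (pvLm nums j.toNat + PySem.List.pyGetD nums j 0 + pvRm nums (j.toNat + 1)) m with h | h
        · simp only [if_pos h]
          rw [min_eq_right (le_of_lt h)]
        · simp only [if_neg (not_lt.mpr h)]
          rw [min_eq_left h]
    · exact hb


lemma pvMain (nums : List Int) : find_minimum_sum nums = find_minimum_sum_alt nums := by
  unfold find_minimum_sum find_minimum_sum_alt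
  simp only [PySem.List.len_eq]
  by_cases h3 : (nums.length : Int) < 3
  · rw [if_pos h3, if_pos h3]
  · rw [if_neg h3, if_neg h3]
    have hn : 3 ≤ nums.length := by omega
    have hL := pvFwdInv nums (nums.length - 1) 1
      (List.replicate (nums.length : Int).toNat 0) (PySem.List.pyGetD nums 0 0)
      (by omega) (by omega) (by simp)
      (by rw [show (Int.toNat 1) = 1 from rfl, pvLm_one nums (by omega)])
    have hR := pvBwdInv nums (nums.length - 1)
      ((nums.length : Int) - 2) (List.replicate (nums.length : Int).toNat 0)
      (PySem.List.pyGetD nums ((nums.length : Int) - 1) 0)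
      (by omega) (by omega) (by simp)
      (by intro _
          have hidx : ((nums.length : Int) - 2).toNat + 1 = nums.length - 1 := by omega
          rw [hidx, pvRm_last nums (by omega)])
    rw [PySem.List.foldl_congr_mem _ _ (pvCandStep nums) []
      (by intro acc j hj
          rcases PySem.List.mem_pyRange_one.mp hj with ⟨hj1, hj2⟩
          have hL' := hL.2 j (by omega) (by omega)
          rw [if_neg (by omega)] at hL'
          have hR' := hR.2 j (by omega) (by omega)
          rw [if_pos (by omega)] at hR'
          rw [hL', hR']
          rfl)]
    rw [PySem.List.foldl_congr_mem _ _ (pvOptStep nums) none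
      (by intro b j hj
          rcases PySem.List.mem_pyRange_one.mp hj with ⟨hj1, hj2⟩
          have hj0 : (0:Int) ≤ j := by omega
          have hj10 : (0:Int) ≤ j + 1 := by omega
          have hidx : (j + 1).toNat = j.toNat + 1 := by omega
          simp only [PySem.List.slice_to nums hj0, PySem.List.slice_from nums hj10, hidx]
          rfl)]
    rw [pvRelate nums _ [] none
      ((PySem.List.min?_eq_none_iff ([] : List Int) (fun y => y)).mpr rfl).symm]

-- ===== VERDICT (by name: the statement is the Claim_ definition above) =====
theorem find_minimum_sum_spec : Claim_equal_find_minimum_sum := by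
  intro nums _
  unfold Spec_find_minimum_sum
  exact pvMain nums
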